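-- pv_equiv track=rewrite | github.com/HuyaneMatsu/hata | build/lib/hata/ext/patchouli/parser.py | remove_block_quote_indents
-- ===== SOURCE A (Python) =====
-- def remove_block_quote_indents(lines):
--     """
--     Removes the dedent from the given lines returning a new list with the lines without them.
--
--     Parameters
--     ----------
--     lines : `list` of `str`
--         Input lines.
--
--     Returns
--     -------
--     lines : `None` or (`list` of `str`)
--     """
--     if not lines:
--         return None
--
--     for index in range(len(lines)):
--         lines[index] = lines[index][1:].lstrip()
--
--     while True:
--         if lines[-1]:
--             break
--
--         del lines[-1]
--         if not lines:
--             return None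
--
--     while True:
--         if lines[0]:
--             break
--
--         del lines[0]
--         continue
--
--     return lines
-- ===== SOURCE B (Python) =====
-- def remove_block_quote_indents(lines):
--     """
--     Same task as A, as one forward pass with two accumulators: `kept` is the
--     trimmed result so far, `pending` buffers interior empty lines until a later
--     non-empty line claims them; leading empties never enter, trailing empties
--     die in `pending` — instead of A's rewrite loop plus two element-by-element
--     deletion loops.
--     Mutates `lines` in place exactly as A does (same final contents, same object returned).
--     """
--     if not lines:
--         return None
--
--     kept = []
--     pending = []
--     for line in lines:
--         stripped = line[1:].lstrip()
--         if stripped: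
--             kept += pending
--             pending = []
--             kept.append(stripped)
--         elif kept:
--             pending.append(stripped)
--         # else: leading empty line, dropped
--
--     if not kept:
--         lines[:] = []
--         return None
--
--     lines[:] = kept
--     return lines
-- ===== Notes on version B (the rewrite author's own statement) =====
-- stated objective: alternative
-- what changed: replaces A's in-place rewrite loop plus two element-by-element del-loops (trailing then leading) with one forward pass using two accumulators (kept result + pending buffer of interior empty lines) and a single slice assignment
import Mathlib
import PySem

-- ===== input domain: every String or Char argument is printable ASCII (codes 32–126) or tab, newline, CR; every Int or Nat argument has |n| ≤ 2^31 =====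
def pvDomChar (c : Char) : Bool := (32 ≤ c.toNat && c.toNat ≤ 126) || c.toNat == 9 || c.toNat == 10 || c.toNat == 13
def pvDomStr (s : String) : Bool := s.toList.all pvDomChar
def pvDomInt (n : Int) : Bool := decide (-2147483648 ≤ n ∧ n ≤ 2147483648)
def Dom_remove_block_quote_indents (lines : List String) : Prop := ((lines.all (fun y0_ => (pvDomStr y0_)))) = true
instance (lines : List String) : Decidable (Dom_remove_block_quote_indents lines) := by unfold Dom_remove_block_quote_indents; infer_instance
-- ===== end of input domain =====

-- B replaces A's rewrite loop plus two element-by-element del-loops (each `del lines[0]` shifts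
-- the whole list) with one linear forward pass using two accumulators.
-- Both Pythons mutate `lines` in place identically; the theorems are about the return value.

-- ===== PORT A =====
-- line[1:].lstrip(), shared subexpression of both Pythons
def pvProc (line : String) : String := PySem.Str.lstrip (PySem.Str.slice line (some 1) none)

-- A's first while-loop: repeatedly `del lines[-1]` while the last line is empty, None if emptied;
-- transliterated as a recursion over the reversed list (deleting at the back = walking the reverse).
def pvBackLoop : List String → Option (List String)
  | [] => none
  | h :: t => if h = "" then pvBackLoop t else some (h :: t)

-- A's second while-loop: repeatedly `del lines[0]` while the first line is empty.
-- (The [] case is unreachable in A — the last line is already known non-empty.)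
def pvFrontLoop : List String → List String
  | [] => []
  | h :: t => if h = "" then pvFrontLoop t else h :: t

def remove_block_quote_indents (lines : List String) : Option (List String) :=
  if lines = [] then none
  else
    let stripped := lines.map pvProc
    match pvBackLoop stripped.reverse with
    | none => none
    | some r => some (pvFrontLoop r.reverse)

-- ===== PORT B =====
-- one step of B's forward loop: kept = trimmed result so far, pending = buffered
-- interior empty lines; Python's `if stripped: … elif kept: …` branch order kept
def pvStep (acc : List String × List String) (s : String) : List String × List String :=
  if s ≠ "" then (acc.1 ++ acc.2 ++ [s], [])
  else if acc.1 ≠ [] then (acc.1, acc.2 ++ [s])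
  else acc

def remove_block_quote_indents_alt (lines : List String) : Option (List String) :=
  if lines = [] then none
  else
    let acc := lines.foldl (fun acc line => pvStep acc (pvProc line)) ([], [])
    if acc.1 = [] then none else some acc.1

-- ===== PRECONDITION & SPEC =====
def Spec_remove_block_quote_indents (lines : List String) (out : Option (List String)) : Prop := out = remove_block_quote_indents_alt lines
instance (lines : List String) (out : Option (List String)) : Decidable (Spec_remove_block_quote_indents lines out) := by unfold Spec_remove_block_quote_indents; infer_instance

-- ===== CLAIM (what is proved, stated in full; the proofs are below) =====
def Claim_equal_remove_block_quote_indents : Prop := ∀ (lines : List String), Dom_remove_block_quote_indents lines → Spec_remove_block_quote_indents lines (remove_block_quote_indents lines)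

-- ===== LEMMAS AND PROOFS =====

-- the emptiness predicate both programs branch on
def pvE : String → Bool := fun s => s == ""

theorem pvE_false {s : String} (h : ¬ s = "") : pvE s = false := by
  simp [pvE, h]

theorem pvBackLoop_eq (r : List String) :
    pvBackLoop r = match r.dropWhile pvE with
      | [] => none
      | l => some l := by
  induction r with
  | nil => rfl
  | cons h t ih =>
      by_cases hh : h = ""
      · simp [pvBackLoop, pvE, hh, ih]
      · simp [pvBackLoop, pvE_false hh, hh]

theorem pvFrontLoop_eq (l : List String) : pvFrontLoop l = l.dropWhile pvE := by
  induction l with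
  | nil => rfl
  | cons h t ih =>
      by_cases hh : h = ""
      · simp [pvFrontLoop, pvE, hh, ih]
      · simp [pvFrontLoop, pvE_false hh, hh]

theorem pvDropWhile_reverse_nil_iff (p : String → Bool) (t : List String) :
    t.reverse.dropWhile p = [] ↔ t.all p = true := by
  simp only [List.dropWhile_eq_nil_iff, List.all_eq_true, List.mem_reverse]

-- the trimmed-both-ends list both programs converge to
def pvKept (m : List String) : List String := (List.rdropWhile pvE m).dropWhile pvE

theorem pvKept_nil_iff (m : List String) : pvKept m = [] ↔ m.all pvE = true := by
  constructor
  · intro h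
    simp only [List.all_eq_true]
    intro x hx
    rw [← List.rdropWhile_append_rtakeWhile (p := pvE) (l := m), List.mem_append] at hx
    rcases hx with hx | hx
    · exact List.dropWhile_eq_nil_iff.mp h x hx
    · exact List.mem_rtakeWhile_imp hx
  · intro h
    have : List.rdropWhile pvE m = [] :=
      List.rdropWhile_eq_nil_iff.mpr (fun x hx => List.all_eq_true.mp h x hx)
    simp [pvKept, this]

theorem pvDropWhile_kept_ne (m : List String) (h : ¬ pvKept m = []) :
    m.dropWhile pvE = pvKept m ++ List.rtakeWhile pvE m := by
  have hne : ¬ (List.rdropWhile pvE m).dropWhile pvE = [] := h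
  calc m.dropWhile pvE
      = (List.rdropWhile pvE m ++ List.rtakeWhile pvE m).dropWhile pvE := by
        rw [List.rdropWhile_append_rtakeWhile]
    _ = pvKept m ++ List.rtakeWhile pvE m := by
        rw [List.dropWhile_append, if_neg (by simpa [List.isEmpty_iff] using hne)]
        rfl

-- B's loop invariant: after any prefix m of the stripped lines, the state is
-- (trimmed-both-ends of m, trailing empties of m — empty while nothing is kept)
theorem pvFoldl_inv (m : List String) :
    m.foldl pvStep ([], []) =
      (pvKept m, if pvKept m = [] then [] else List.rtakeWhile pvE m) := by
  induction m using List.reverseRecOn with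
  | nil => simp [pvKept]
  | append_singleton m s ih =>
      rw [List.foldl_append, List.foldl_cons, List.foldl_nil, ih]
      by_cases hs : s = ""
      · subst hs
        have hpe : pvE "" = true := by simp [pvE]
        by_cases hk : pvKept m = []
        · have hall : (m ++ [""]).all pvE = true := by
            have := (pvKept_nil_iff m).mp hk
            simp [List.all_append, this, hpe]
          have : pvKept (m ++ [""]) = [] := (pvKept_nil_iff (m ++ [""])).mpr hall
          simp [pvStep, hk, this]
        · have hkept : pvKept (m ++ [""]) = pvKept m := by
            simp [pvKept, List.rdropWhile_concat_pos pvE m "" hpe]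
          have hpnd : List.rtakeWhile pvE (m ++ [""]) = List.rtakeWhile pvE m ++ [""] :=
            List.rtakeWhile_concat_pos pvE m "" hpe
          simp [pvStep, hk, hkept, hpnd]
      · have hpe : pvE s = false := pvE_false hs
        have hrd : List.rdropWhile pvE (m ++ [s]) = m ++ [s] :=
          List.rdropWhile_concat_neg pvE m s (by simp [hpe])
        have hpnd : List.rtakeWhile pvE (m ++ [s]) = [] := by
          simp [hpe]
        by_cases hk : pvKept m = []
        · have hdm : m.dropWhile pvE = [] := by
            refine List.dropWhile_eq_nil_iff.mpr ?_
            exact fun x hx => List.all_eq_true.mp ((pvKept_nil_iff m).mp hk) x hx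
          have hkept : pvKept (m ++ [s]) = [s] := by
            simp [pvKept, hrd, List.dropWhile_append, hdm, hpe]
          simp [pvStep, hs, hk, hkept, hpnd]
        · have hdm : ¬ m.dropWhile pvE = [] := by
            rw [pvDropWhile_kept_ne m hk]
            simp [hk]
          have hkept : pvKept (m ++ [s]) = pvKept m ++ List.rtakeWhile pvE m ++ [s] := by
            rw [pvKept, hrd, List.dropWhile_append,
              if_neg (by simpa [List.isEmpty_iff] using hdm), pvDropWhile_kept_ne m hk,
              List.append_assoc]
          have : pvKept (m ++ [s]) ≠ [] := by simp [hkept]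
          simp [pvStep, hs, hk, hkept, hpnd]

theorem pvA_core (m : List String) :
    (match pvBackLoop m.reverse with
      | none => none
      | some r => some (pvFrontLoop r.reverse)) =
    (if m.all pvE then none
     else some ((List.rdropWhile pvE m).dropWhile pvE)) := by
  rw [pvBackLoop_eq]
  by_cases hall : m.all pvE
  · have : m.reverse.dropWhile pvE = [] := (pvDropWhile_reverse_nil_iff pvE m).mpr hall
    simp [this, hall]
  · have hne : m.reverse.dropWhile pvE ≠ [] := by
      simpa [pvDropWhile_reverse_nil_iff] using hall
    cases hd : m.reverse.dropWhile pvE with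
    | nil => exact absurd hd hne
    | cons a l =>
        simp only [hall]
        rw [pvFrontLoop_eq]
        have : List.rdropWhile pvE m = (a :: l).reverse := by
          simp [List.rdropWhile, hd]
        simp [this]

-- ===== VERDICT (by name: the statement is the Claim_ definition above) =====
theorem remove_block_quote_indents_spec : Claim_equal_remove_block_quote_indents := by
  intro lines _
  unfold Spec_remove_block_quote_indents
  unfold remove_block_quote_indents remove_block_quote_indents_alt
  by_cases h : lines = []
  · simp [h]
  · simp only [h, if_false]
    rw [pvA_core (lines.map pvProc), ← List.foldl_map, pvFoldl_inv (lines.map pvProc)]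
    by_cases hall : (lines.map pvProc).all pvE
    · have : pvKept (lines.map pvProc) = [] := (pvKept_nil_iff _).mpr hall
      simp [hall, this]
    · have hk : ¬ pvKept (lines.map pvProc) = [] := fun hk => hall ((pvKept_nil_iff _).mp hk)
      simp [hall, hk]
      rfl
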